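-- pv_equiv track=rewrite | github.com/heimgewebe/tools | merger/lenskit/adapters/metarepo.py | _should_process_entry
-- ===== SOURCE A (Python) =====
-- from typing import Dict, List, Optional, Any
--
-- def _should_process_entry(entry: Dict[str, Any], targets: Optional[List[str]]) -> bool:
--     """
--     Filter entries based on target list.
--     Matches segments: 'wgx' matches 'wgx', 'wgx/foo', 'wgx:bar', but NOT 'wgx_extra'.
--     """
--     if not targets:
--         return True
--
--     eid = entry.get("id", "")
--     for t in targets:
--         # Exact match
--         if eid == t:
--             return True
--         # Prefix match with separator
--         if eid.startswith(t + "/") or eid.startswith(t + ":"):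
--             return True
--     return False
-- ===== SOURCE B (Python) =====
-- def _should_process_entry(entry, targets):
--     """Collect eid's segment candidates (eid plus each prefix cut before a '/' or ':'), then test membership in targets."""
--     if not targets:
--         return True
--     eid = entry.get("id", "")
--     cands = [eid]
--     pref = ""
--     for ch in eid:
--         if ch == "/" or ch == ":":
--             cands.append(pref)
--         pref += ch
--     return any(c in targets for c in cands)
-- ===== Notes on version B (the rewrite author's own statement) =====
-- stated objective: alternative
-- what changed: A scans every target and does an equality test plus two startswith prefix tests per target; B first collects eid's candidate cut points (eid itself and each prefix ending just before a '/' or ':') in one pass over eid, then tests each candidate for membership in targets.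
import Mathlib
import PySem

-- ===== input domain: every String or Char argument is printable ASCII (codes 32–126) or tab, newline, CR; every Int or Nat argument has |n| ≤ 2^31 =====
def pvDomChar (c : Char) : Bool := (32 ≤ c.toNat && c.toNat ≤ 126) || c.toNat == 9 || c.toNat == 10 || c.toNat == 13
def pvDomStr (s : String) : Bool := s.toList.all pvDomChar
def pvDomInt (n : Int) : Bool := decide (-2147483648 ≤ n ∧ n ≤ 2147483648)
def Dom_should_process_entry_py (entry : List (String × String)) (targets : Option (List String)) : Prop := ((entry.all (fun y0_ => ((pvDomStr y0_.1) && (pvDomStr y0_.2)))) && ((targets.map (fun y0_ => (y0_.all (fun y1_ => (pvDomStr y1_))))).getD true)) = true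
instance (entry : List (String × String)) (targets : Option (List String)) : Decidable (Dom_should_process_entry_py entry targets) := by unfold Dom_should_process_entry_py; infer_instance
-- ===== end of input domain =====

-- B inverts A's traversal: instead of scanning every target with prefix tests, it collects
-- eid's candidate cuts (eid and each prefix ending before a '/' or ':') in one pass over eid,
-- then tests each candidate for membership in targets (objective: alternative).

-- ===== PORT A =====
def should_process_entry_py (entry : List (String × String)) (targets : Option (List String)) : Bool :=
  match targets with
  | none => true                       -- `if not targets` (None)
  | some ts =>
    if ts.isEmpty then true            -- `if not targets` (empty list)
    else
      let eid := PySem.Dict.getD ⟨entry⟩ "id" ""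
      ts.any (fun t =>
        eid == t ||
        (PySem.Str.startswith eid (t ++ "/") || PySem.Str.startswith eid (t ++ ":")))

-- ===== PORT B =====
-- Source B's `for ch in eid` loop collecting separator-cut prefixes, as the obvious
-- structural recursion over eid's characters with the `pref` accumulator.
def pvSepCuts : List Char → List Char → List String
  | _, [] => []
  | pref, c :: rest =>
    if c == '/' || c == ':' then String.ofList pref :: pvSepCuts (pref ++ [c]) rest
    else pvSepCuts (pref ++ [c]) rest

def should_process_entry_py_alt (entry : List (String × String)) (targets : Option (List String)) : Bool :=
  match targets with
  | none => true
  | some ts =>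
    if ts.isEmpty then true
    else
      let eid := PySem.Dict.getD ⟨entry⟩ "id" ""
      let cands := eid :: pvSepCuts [] eid.toList
      cands.any (fun c => ts.contains c)

-- ===== PRECONDITION & SPEC =====
def Spec_should_process_entry_py (entry : List (String × String)) (targets : Option (List String)) (out : Bool) : Prop := out = should_process_entry_py_alt entry targets
instance (entry : List (String × String)) (targets : Option (List String)) (out : Bool) : Decidable (Spec_should_process_entry_py entry targets out) := by unfold Spec_should_process_entry_py; infer_instance

-- ===== CLAIM (what is proved, stated in full; the proofs are below) =====
def Claim_equal_should_process_entry_py : Prop := ∀ (entry : List (String × String)) (targets : Option (List String)), Dom_should_process_entry_py entry targets → Spec_should_process_entry_py entry targets (should_process_entry_py entry targets)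

-- ===== LEMMAS AND PROOFS =====

-- A list followed by one element is a prefix of m iff that element occurs at some
-- position i of m and m's prefix of length i is the list.
lemma append_singleton_prefix_iff {α : Type} (l m : List α) (c : α) :
    (l ++ [c] <+: m) ↔ ∃ i : Nat, m[i]? = some c ∧ m.take i = l := by
  constructor
  · rintro ⟨r, hr⟩
    refine ⟨l.length, ?_, ?_⟩ <;> subst hr <;> simp
  · rintro ⟨i, hc, ht⟩
    obtain ⟨hi, hg⟩ := List.getElem?_eq_some_iff.mp hc
    refine ⟨m.drop (i + 1), ?_⟩
    calc (l ++ [c]) ++ m.drop (i + 1)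
        = m.take i ++ (m[i] :: m.drop (i + 1)) := by rw [ht, hg]; simp
      _ = m.take i ++ m.drop i := by rw [← List.drop_eq_getElem_cons hi]
      _ = m := List.take_append_drop i m

lemma startswith_sep_iff (s t : String) (c : Char) (sep : String) (hsep : sep.toList = [c]) :
    PySem.Str.startswith s (t ++ sep) = true ↔ t.toList ++ [c] <+: s.toList := by
  rw [PySem.Str.startswith_eq, String.toList_append, hsep, PySem.Chars.startswith_iff]

-- Membership in B's cut list, characterised: x is the prefix (after `pref`) ending at
-- some position i of l that holds '/' or ':'.
lemma mem_pvSepCuts_iff (l : List Char) : ∀ (pref : List Char) (x : String),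
    x ∈ pvSepCuts pref l ↔ ∃ i : Nat, i < l.length ∧
      (l[i]? = some '/' ∨ l[i]? = some ':') ∧ x = String.ofList (pref ++ l.take i) := by
  induction l with
  | nil => intro pref x; simp [pvSepCuts]
  | cons c rest ih =>
    intro pref x
    have shift : (∃ i : Nat, i < rest.length ∧
        ((rest[i]? = some '/' ∨ rest[i]? = some ':') ∧
          x = String.ofList ((pref ++ [c]) ++ rest.take i))) ↔
        (∃ i : Nat, 0 < i ∧ i < (c :: rest).length ∧
          ((c :: rest)[i]? = some '/' ∨ (c :: rest)[i]? = some ':') ∧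
          x = String.ofList (pref ++ (c :: rest).take i)) := by
      constructor
      · rintro ⟨j, hj, hs, hx⟩
        exact ⟨j + 1, Nat.succ_pos j, by simpa using Nat.succ_lt_succ hj, by simpa using hs,
          by simpa [List.take_succ_cons] using hx⟩
      · rintro ⟨i, hpos, hlen, hs, hx⟩
        obtain ⟨j, rfl⟩ := Nat.exists_eq_add_of_lt hpos
        refine ⟨j, by simpa using Nat.lt_of_succ_lt_succ (by simpa [Nat.add_comm] using hlen), ?_, ?_⟩
        · simpa [Nat.add_comm] using hs
        · simpa [Nat.add_comm, List.take_succ_cons] using hx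
    by_cases hc : (c == '/' || c == ':') = true
    · simp only [pvSepCuts, hc, if_true, List.mem_cons, ih (pref ++ [c]) x, shift]
      constructor
      · rintro (rfl | h)
        · refine ⟨0, Nat.succ_pos _, ?_, by simp⟩
          rcases Bool.or_eq_true _ _ |>.mp hc with h' | h' <;>
            simp [beq_iff_eq.mp h']
        · obtain ⟨i, _, hi⟩ := h; exact ⟨i, hi.1, hi.2⟩
      · rintro ⟨i, hlen, hs, hx⟩
        rcases Nat.eq_zero_or_pos i with rfl | hpos
        · left; simpa using hx
        · exact Or.inr ⟨i, hpos, hlen, hs, hx⟩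
    · simp only [pvSepCuts, hc, Bool.false_eq_true, if_false, ih (pref ++ [c]) x, shift]
      constructor
      · rintro ⟨i, _, hlen, hs, hx⟩; exact ⟨i, hlen, hs, hx⟩
      · rintro ⟨i, hlen, hs, hx⟩
        rcases Nat.eq_zero_or_pos i with rfl | hpos
        · exfalso
          simp only [List.getElem?_cons_zero, Option.some_inj] at hs
          rcases hs with rfl | rfl <;> simp at hc
        · exact ⟨i, hpos, hlen, hs, hx⟩

-- A's per-target scan equals B's candidate scan.
lemma main_any_eq (ts : List String) (eid : String) :
    (ts.any fun t =>
        eid == t ||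
        (PySem.Str.startswith eid (t ++ "/") || PySem.Str.startswith eid (t ++ ":")))
    = ((eid :: pvSepCuts [] eid.toList).any (fun c => ts.contains c)) := by
  rw [Bool.eq_iff_iff, List.any_eq_true, List.any_cons, Bool.or_eq_true, List.any_eq_true]
  constructor
  · rintro ⟨t, hts, htp⟩
    rcases Bool.or_eq_true _ _ |>.mp htp with heq | hpre
    · exact Or.inl (by rw [beq_iff_eq.mp heq]; exact List.contains_iff_mem.mpr hts)
    · right
      rcases Bool.or_eq_true _ _ |>.mp hpre with h1 | h2
      · obtain ⟨i, hcg, htk⟩ := (append_singleton_prefix_iff _ _ _).mp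
          ((startswith_sep_iff eid t '/' "/" rfl).mp h1)
        obtain ⟨hilen, -⟩ := List.getElem?_eq_some_iff.mp hcg
        refine ⟨t, ?_, List.contains_iff_mem.mpr hts⟩
        exact (mem_pvSepCuts_iff _ [] t).mpr ⟨i, hilen, Or.inl hcg, by simp [htk]⟩
      · obtain ⟨i, hcg, htk⟩ := (append_singleton_prefix_iff _ _ _).mp
          ((startswith_sep_iff eid t ':' ":" rfl).mp h2)
        obtain ⟨hilen, -⟩ := List.getElem?_eq_some_iff.mp hcg
        refine ⟨t, ?_, List.contains_iff_mem.mpr hts⟩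
        exact (mem_pvSepCuts_iff _ [] t).mpr ⟨i, hilen, Or.inr hcg, by simp [htk]⟩
  · rintro (h | ⟨x, hx, hmem⟩)
    · exact ⟨eid, List.contains_iff_mem.mp h, by simp⟩
    · obtain ⟨i, hlen, hs, rfl⟩ := (mem_pvSepCuts_iff _ [] x).mp hx
      refine ⟨_, List.contains_iff_mem.mp hmem, ?_⟩
      apply Bool.or_eq_true _ _ |>.mpr; right
      apply Bool.or_eq_true _ _ |>.mpr
      rcases hs with h' | h'
      · exact Or.inl ((startswith_sep_iff eid _ '/' "/" rfl).mpr
          ((append_singleton_prefix_iff _ _ _).mpr ⟨i, h', by simp⟩))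
      · exact Or.inr ((startswith_sep_iff eid _ ':' ":" rfl).mpr
          ((append_singleton_prefix_iff _ _ _).mpr ⟨i, h', by simp⟩))

-- ===== VERDICT (by name: the statement is the Claim_ definition above) =====
theorem should_process_entry_py_spec : Claim_equal_should_process_entry_py := by
  intro entry targets _
  unfold Spec_should_process_entry_py should_process_entry_py should_process_entry_py_alt
  cases targets with
  | none => rfl
  | some ts =>
    by_cases h : ts.isEmpty
    · simp only [h, if_true]
    · simp only [h, Bool.false_eq_true, if_false]
      exact main_any_eq ts _
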